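-- pv_equiv track=rewrite | github.com/aminballoon/flush_bot | FlushOS/Flush_main/Flush_Image.py | Flush_Sorted_Symbol_Point
-- ===== SOURCE A (Python) =====
-- def Flush_Sorted_Symbol_Point(List_Symbol,Find):
--     Symbol1 = []
--     Symbol2 = []
--     for i in List_Symbol:
--         if Find in i:
--             num = i.index(Find)
--             Symbol1 = [i[num],i[num-1]]
--         else:
--             Symbol2 = i
--     return Symbol1,Symbol2
-- ===== SOURCE B (Python) =====
-- def Flush_Sorted_Symbol_Point(List_Symbol, Find):
--     # last sub-list containing Find, searched backwards with short-circuit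
--     Symbol1 = []
--     for i in reversed(List_Symbol):
--         if Find in i:
--             num = i.index(Find)
--             Symbol1 = [i[num], i[num - 1]]
--             break
--     # last sub-list NOT containing Find, independent backward search
--     Symbol2 = next((i for i in reversed(List_Symbol) if Find not in i), [])
--     return Symbol1, Symbol2
-- ===== Notes on version B (the rewrite author's own statement) =====
-- stated objective: alternative
-- what changed: Replaces A's single forward loop that carries both accumulators with two independent short-circuiting backward searches (find last sub-list containing Find, find last sub-list not containing it).
import Mathlib
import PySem

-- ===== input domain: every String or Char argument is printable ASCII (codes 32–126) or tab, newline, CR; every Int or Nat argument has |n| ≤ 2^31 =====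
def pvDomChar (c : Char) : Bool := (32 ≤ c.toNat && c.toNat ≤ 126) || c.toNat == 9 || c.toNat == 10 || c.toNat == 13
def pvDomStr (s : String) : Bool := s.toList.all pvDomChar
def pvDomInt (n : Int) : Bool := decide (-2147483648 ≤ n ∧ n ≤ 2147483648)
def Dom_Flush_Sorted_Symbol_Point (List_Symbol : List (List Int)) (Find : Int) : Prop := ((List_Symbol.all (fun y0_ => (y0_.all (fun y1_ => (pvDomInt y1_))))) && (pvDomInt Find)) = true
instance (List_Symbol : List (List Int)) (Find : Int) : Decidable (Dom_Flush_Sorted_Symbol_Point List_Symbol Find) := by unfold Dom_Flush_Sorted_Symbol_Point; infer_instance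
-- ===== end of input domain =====

-- B replaces A's single combined forward loop by two independent short-circuiting
-- backward searches (objective: alternative decomposition, same cost).

-- shared line 'Symbol1 = [i[num], i[num-1]]' with num = i.index(Find)
-- (the 'none' arm is unreachable when Find ∈ i; .getD 0 likewise never fires there)
def pvSym1 (i : List Int) (Find : Int) : List Int :=
  match PySem.List.index? i Find with
  | some num => [(PySem.List.pyGet? i (num : Int)).getD 0, (PySem.List.pyGet? i ((num : Int) - 1)).getD 0]
  | none => []

-- ===== PORT A =====
-- one forward loop carrying (Symbol1, Symbol2)
def Flush_Sorted_Symbol_Point (List_Symbol : List (List Int)) (Find : Int) : List Int × List Int :=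
  List_Symbol.foldl
    (fun s i => if Find ∈ i then (pvSym1 i Find, s.2) else (s.1, i))
    ([], [])

-- ===== PORT B =====
-- two independent backward searches (reversed(...) with early exit = find? on reverse)
def Flush_Sorted_Symbol_Point_alt (List_Symbol : List (List Int)) (Find : Int) : List Int × List Int :=
  let s1 := match List_Symbol.reverse.find? (fun i => decide (Find ∈ i)) with
    | some i => pvSym1 i Find
    | none => []
  let s2 := match List_Symbol.reverse.find? (fun i => decide (Find ∉ i)) with
    | some i => i
    | none => []
  (s1, s2)

-- ===== PRECONDITION & SPEC =====
def Spec_Flush_Sorted_Symbol_Point (List_Symbol : List (List Int)) (Find : Int) (out : List Int × List Int) : Prop := out = Flush_Sorted_Symbol_Point_alt List_Symbol Find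
instance (List_Symbol : List (List Int)) (Find : Int) (out : List Int × List Int) : Decidable (Spec_Flush_Sorted_Symbol_Point List_Symbol Find out) := by unfold Spec_Flush_Sorted_Symbol_Point; infer_instance

-- ===== CLAIM (what is proved, stated in full; the proofs are below) =====
def Claim_equal_Flush_Sorted_Symbol_Point : Prop := ∀ (List_Symbol : List (List Int)) (Find : Int), Dom_Flush_Sorted_Symbol_Point List_Symbol Find → Spec_Flush_Sorted_Symbol_Point List_Symbol Find (Flush_Sorted_Symbol_Point List_Symbol Find)

-- ===== LEMMAS AND PROOFS =====

-- loop invariant: the fold from any start state is decided by the LAST matching /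
-- non-matching element, i.e. by a backward search
theorem pvFold_eq (Find : Int) (L : List (List Int)) (s : List Int × List Int) :
    L.foldl (fun s i => if Find ∈ i then (pvSym1 i Find, s.2) else (s.1, i)) s =
      ((match L.reverse.find? (fun i => decide (Find ∈ i)) with
        | some i => pvSym1 i Find
        | none => s.1),
       (match L.reverse.find? (fun i => decide (Find ∉ i)) with
        | some i => i
        | none => s.2)) := by
  induction L generalizing s with
  | nil => simp
  | cons i L ih =>
    simp only [List.foldl_cons, ih, List.reverse_cons, List.find?_append]
    by_cases h : Find ∈ i <;>
      cases hf : L.reverse.find? (fun i => decide (Find ∈ i)) <;>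
      cases hg : L.reverse.find? (fun i => decide (Find ∉ i)) <;>
      simp [h, Option.or]

-- ===== VERDICT (by name: the statement is the Claim_ definition above) =====
theorem Flush_Sorted_Symbol_Point_spec : Claim_equal_Flush_Sorted_Symbol_Point := by
  intro L Find _
  show _ = _
  rw [Flush_Sorted_Symbol_Point, Flush_Sorted_Symbol_Point_alt, pvFold_eq]
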